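-- pv_equiv track=rewrite | github.com/thisis-hee/PS | 프로그래머스/1/42840. 모의고사/모의고사.py | solution
-- ===== SOURCE A (Python) =====
-- from collections import deque
--
-- def solution(answers):
--
--     n1=deque([1,2,3,4,5])
--     n2=deque([2,1,2,3,2,4,2,5])
--     n3=deque([3,3,1,1,2,2,4,4,5,5])
--     n1_correct=0
--     n2_correct=0
--     n3_correct=0
--
--     for i in answers:
--         n1.append(n1[0])
--         n2.append(n2[0])
--         n3.append(n3[0])
--         if n1.popleft() == i:
--             n1_correct+=1
--         if n2.popleft() == i:
--             n2_correct+=1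
--         if n3.popleft() == i:
--             n3_correct+=1
--
--     result = max(n1_correct, n2_correct, n3_correct)
--
--     answer=[]
--
--     if(n1_correct==result):
--         answer.append(1)
--     if(n2_correct==result):
--         answer.append(2)
--     if(n3_correct==result):
--         answer.append(3)
--
--     return answer
-- ===== SOURCE B (Python) =====
-- def solution(answers):
--     def score(p):
--         s, i = 0, 0
--         while i < len(answers):
--             s += sum(a == b for a, b in zip(answers[i:i+len(p)], p))
--             i += len(p)
--         return s
--     s1 = score([1, 2, 3, 4, 5])
--     s2 = score([2, 1, 2, 3, 2, 4, 2, 5])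
--     s3 = score([3, 3, 1, 1, 2, 2, 4, 4, 5, 5])
--     best = max(s1, s2, s3)
--     return [k for k, s in ((1, s1), (2, s2), (3, s3)) if s == best]
-- ===== Notes on version B (the rewrite author's own statement) =====
-- stated objective: alternative
-- what changed: Replaces A's single lock-step loop rotating three deques with a staged chunking pass per pattern: the answer list is split into pattern-length blocks and each block is zip-compared with the fixed pattern, then a comprehension picks the top scorers.
import Mathlib
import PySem

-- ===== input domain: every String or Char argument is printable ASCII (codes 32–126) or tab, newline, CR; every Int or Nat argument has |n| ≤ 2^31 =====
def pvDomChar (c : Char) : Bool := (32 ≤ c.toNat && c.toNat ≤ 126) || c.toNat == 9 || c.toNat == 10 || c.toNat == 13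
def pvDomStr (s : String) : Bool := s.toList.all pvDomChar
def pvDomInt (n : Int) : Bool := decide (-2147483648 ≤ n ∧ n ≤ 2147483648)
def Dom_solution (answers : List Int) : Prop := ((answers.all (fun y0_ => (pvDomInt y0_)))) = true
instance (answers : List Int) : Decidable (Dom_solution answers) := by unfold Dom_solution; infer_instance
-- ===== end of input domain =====

-- B replaces A's single lock-step loop rotating three deques by staged chunking passes:
-- per pattern, split the answers into pattern-length blocks and zip-compare each block
-- (alternative decomposition, same cost).

-- ===== PORT A =====
-- one iteration of A's for-loop: append d[0], popleft and compare; the deques are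
-- never empty (they start nonempty and keep their length), so the catch-all is unreachable
def stepA (st : List Int × List Int × List Int × Int × Int × Int) (i : Int) :
    List Int × List Int × List Int × Int × Int × Int :=
  match st with
  | (a1 :: t1, a2 :: t2, a3 :: t3, c1, c2, c3) =>
      (t1 ++ [a1], t2 ++ [a2], t3 ++ [a3],
       c1 + (if a1 = i then 1 else 0),
       c2 + (if a2 = i then 1 else 0),
       c3 + (if a3 = i then 1 else 0))
  | st => st

def solution (answers : List Int) : List Int :=
  let fin := answers.foldl stepA
      ([1, 2, 3, 4, 5], [2, 1, 2, 3, 2, 4, 2, 5], [3, 3, 1, 1, 2, 2, 4, 4, 5, 5],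
       (0 : Int), (0 : Int), (0 : Int))
  let c1 := fin.2.2.2.1
  let c2 := fin.2.2.2.2.1
  let c3 := fin.2.2.2.2.2
  let result := max c1 (max c2 c3)
  (if c1 = result then [1] else []) ++
  (if c2 = result then [2] else []) ++
  (if c3 = result then [3] else [])

-- ===== PORT B =====
-- sum(a == b for a, b in zip(chunk, p))
def zipScore (chunk p : List Int) : Int :=
  (((chunk.zip p).filter (fun ab => ab.1 == ab.2)).length : Int)

-- the while-loop of B's `score`: one pattern-length chunk per step, sliced at index i;
-- the step is written `i + (p.length - 1) + 1` (= i + p.length for the nonempty patterns)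
-- so Lean sees i strictly increase
def scoreB (p answers : List Int) (i : Nat) : Int :=
  if i < answers.length then
    zipScore (PySem.List.slice answers (some (i : Int)) (some ((i : Int) + (p.length : Int)))) p
      + scoreB p answers (i + (p.length - 1) + 1)
  else 0
termination_by answers.length - i
decreasing_by omega

def solution_alt (answers : List Int) : List Int :=
  let s1 := scoreB [1, 2, 3, 4, 5] answers 0
  let s2 := scoreB [2, 1, 2, 3, 2, 4, 2, 5] answers 0
  let s3 := scoreB [3, 3, 1, 1, 2, 2, 4, 4, 5, 5] answers 0
  let best := max s1 (max s2 s3)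
  (([((1 : Int), s1), (2, s2), (3, s3)].filter (fun kc => kc.2 == best)).map Prod.fst)

-- ===== PRECONDITION & SPEC =====
def Spec_solution (answers : List Int) (out : List Int) : Prop := out = solution_alt answers
instance (answers : List Int) (out : List Int) : Decidable (Spec_solution answers out) := by unfold Spec_solution; infer_instance

-- ===== CLAIM =====
def Claim_equal_solution : Prop := ∀ (answers : List Int), Dom_solution answers → Spec_solution answers (solution answers)

-- ===== LEMMAS AND PROOFS =====

-- number of positions j in xs with xs[j] = p[(k+j) % len p], as an Int
def cnt (p : List Int) : List Int → Nat → Int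
  | [], _ => 0
  | x :: xs, k => (if p.getD (k % p.length) 0 = x then 1 else 0) + cnt p xs (k + 1)

lemma cnt_append (p : List Int) :
    ∀ (c ys : List Int) (k : Nat), cnt p (c ++ ys) k = cnt p c k + cnt p ys (k + c.length) := by
  intro c
  induction c with
  | nil => intro ys k; simp [cnt]
  | cons x c ih =>
      intro ys k
      simp only [List.cons_append, cnt, ih, List.length_cons]
      have h : k + 1 + c.length = k + (c.length + 1) := by omega
      rw [h, add_assoc]

lemma cnt_add_len (p : List Int) :
    ∀ (xs : List Int) (k : Nat), cnt p xs (k + p.length) = cnt p xs k := by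
  intro xs
  induction xs with
  | nil => intro k; simp [cnt]
  | cons x xs ih =>
      intro k
      simp only [cnt, Nat.add_mod_right]
      have : k + p.length + 1 = (k + 1) + p.length := by omega
      rw [this, ih]

lemma zipScore_eq (p : List Int) :
    ∀ (c : List Int) (k : Nat), k + c.length ≤ p.length →
      (((c.zip (p.drop k)).filter (fun ab => ab.1 == ab.2)).length : Int) = cnt p c k := by
  intro c
  induction c with
  | nil => intro k _; simp [cnt]
  | cons x c ih =>
      intro k hk
      have hkl : k < p.length := by simp at hk; omega
      have hdrop : p.drop k = p[k] :: p.drop (k + 1) := List.drop_eq_getElem_cons hkl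
      have hget : p.getD (k % p.length) 0 = p[k] := by
        rw [Nat.mod_eq_of_lt hkl, List.getD_eq_getElem p 0 hkl]
      have hrec := ih (k + 1) (by simp at hk ⊢; omega)
      rw [hdrop]
      simp only [List.zip_cons_cons, List.filter_cons, beq_iff_eq]
      rw [cnt, hget, ← hrec]
      by_cases h : x = p[k]
      · rw [if_pos h]
        push_cast [List.length_cons]
        rw [if_pos h.symm]; ring
      · rw [if_neg h, if_neg (fun he => h he.symm)]
        ring

lemma scoreB_eq_aux (p : List Int) (hp : p ≠ []) (xs : List Int) :
    ∀ (i : Nat), scoreB p xs i = cnt p (xs.drop i) 0 := by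
  have hL : 0 < p.length := List.length_pos_of_ne_nil hp
  intro i
  induction hn : xs.length - i using Nat.strong_induction_on generalizing i with
  | _ n ih =>
      rw [scoreB]
      by_cases h : i < xs.length
      · rw [if_pos h]
        have hstep : i + (p.length - 1) + 1 = i + p.length := by omega
        rw [hstep, ih (xs.length - (i + p.length)) (by omega) (i + p.length) rfl]
        have hslice : PySem.List.slice xs (some (i : Int)) (some ((i : Int) + (p.length : Int)))
            = (xs.drop i).take p.length := PySem.List.slice_natCast_add xs i p.length
        have hdd : xs.drop (i + p.length) = (xs.drop i).drop p.length := by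
          rw [List.drop_drop]
        rw [hslice, hdd]
        have hsplit : xs.drop i = (xs.drop i).take p.length ++ (xs.drop i).drop p.length :=
          (List.take_append_drop _ _).symm
        conv_rhs => rw [hsplit]
        rw [cnt_append]
        have hzs : zipScore ((xs.drop i).take p.length) p
            = cnt p ((xs.drop i).take p.length) 0 := by
          unfold zipScore
          have := zipScore_eq p ((xs.drop i).take p.length) 0 (by simp)
          simpa using this
        rw [hzs]
        congr 1
        by_cases hle : i + p.length ≤ xs.length
        · have hlen : ((xs.drop i).take p.length).length = p.length := by simp; omega
          rw [hlen]
          exact (cnt_add_len p ((xs.drop i).drop p.length) 0).symm |>.trans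
            (by rw [Nat.zero_add])
        · have hnil : (xs.drop i).drop p.length = [] := by
            apply List.drop_eq_nil_of_le; simp; omega
          simp [hnil, cnt]
      · rw [if_neg h]
        rw [List.drop_eq_nil_of_le (by omega)]
        simp [cnt]

lemma scoreB_eq (p : List Int) (hp : p ≠ []) (xs : List Int) :
    scoreB p xs 0 = cnt p xs 0 := by
  simpa using scoreB_eq_aux p hp xs 0

lemma rotate_step {p : List Int} (hp : p ≠ []) (k : Nat) :
    ∃ a t, p.rotate k = a :: t ∧ a = p.getD (k % p.length) 0 ∧ t ++ [a] = p.rotate (k + 1) := by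
  have hne : p.rotate k ≠ [] := by simp [hp]
  obtain ⟨a, t, hrot⟩ := List.exists_cons_of_ne_nil hne
  have hlen : 0 < (p.rotate k).length := by rw [hrot]; simp
  refine ⟨a, t, hrot, ?_, ?_⟩
  · have h0 : (p.rotate k)[0]'hlen = a := by simp [hrot]
    have h1 := List.getElem_rotate p k 0 hlen
    have hm : k % p.length < p.length := Nat.mod_lt _ (by cases p <;> simp_all)
    rw [h0] at h1
    rw [h1, List.getD_eq_getElem p 0 hm]
    simp
  · have h1 : (a :: t).rotate 1 = t ++ [a] := by simp [List.rotate_cons_succ]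
    rw [← h1, ← hrot, List.rotate_rotate]

lemma loopA (p1 p2 p3 : List Int) (h1 : p1 ≠ []) (h2 : p2 ≠ []) (h3 : p3 ≠ []) :
    ∀ (xs : List Int) (k : Nat) (c1 c2 c3 : Int),
      xs.foldl stepA (p1.rotate k, p2.rotate k, p3.rotate k, c1, c2, c3)
        = (p1.rotate (k + xs.length), p2.rotate (k + xs.length), p3.rotate (k + xs.length),
           c1 + cnt p1 xs k, c2 + cnt p2 xs k, c3 + cnt p3 xs k) := by
  intro xs
  induction xs with
  | nil => intro k c1 c2 c3; simp [cnt]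
  | cons x xs ih =>
      intro k c1 c2 c3
      obtain ⟨a1, t1, e1, v1, r1⟩ := rotate_step h1 k
      obtain ⟨a2, t2, e2, v2, r2⟩ := rotate_step h2 k
      obtain ⟨a3, t3, e3, v3, r3⟩ := rotate_step h3 k
      rw [List.foldl_cons, e1, e2, e3]
      show xs.foldl stepA
          (t1 ++ [a1], t2 ++ [a2], t3 ++ [a3],
           c1 + (if a1 = x then 1 else 0),
           c2 + (if a2 = x then 1 else 0),
           c3 + (if a3 = x then 1 else 0)) = _
      rw [r1, r2, r3, ih (k + 1)]
      have hk : k + 1 + xs.length = k + (xs.length + 1) := by omega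
      simp only [cnt, ← v1, ← v2, ← v3, List.length_cons, hk, add_assoc]

-- ===== VERDICT (by name: the statement is the Claim_ definition above) =====
theorem solution_spec : Claim_equal_solution := by
  intro answers _
  unfold Spec_solution solution solution_alt
  have h := loopA [1, 2, 3, 4, 5] [2, 1, 2, 3, 2, 4, 2, 5] [3, 3, 1, 1, 2, 2, 4, 4, 5, 5]
      (by simp) (by simp) (by simp) answers 0 0 0 0
  simp only [List.rotate_zero] at h
  rw [h]
  simp only [zero_add, scoreB_eq [1, 2, 3, 4, 5] (by simp) answers,
    scoreB_eq [2, 1, 2, 3, 2, 4, 2, 5] (by simp) answers,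
    scoreB_eq [3, 3, 1, 1, 2, 2, 4, 4, 5, 5] (by simp) answers]
  set c1 := cnt [1, 2, 3, 4, 5] answers 0
  set c2 := cnt [2, 1, 2, 3, 2, 4, 2, 5] answers 0
  set c3 := cnt [3, 3, 1, 1, 2, 2, 4, 4, 5, 5] answers 0
  simp only [List.filter_cons, List.filter_nil, beq_iff_eq]
  generalize max c1 (max c2 c3) = r
  by_cases e1 : c1 = r <;> by_cases e2 : c2 = r <;> by_cases e3 : c3 = r <;>
    simp [e1, e2, e3]
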